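-- pv_equiv track=rewrite | github.com/braysia/epitope_barcoding | barcoding/datatype_handling.py | sort_multi_lists
-- ===== SOURCE A (Python) =====
-- def uniform_list_length(labels):
--     """
--     Insert empty string untill all the elements in labels have the same length.
--
--     Examples:
--
--     >>> uniform_list_length([['a'], ['a', 'b'], ['a', 'b', 'c']])
--     [['a', ' ', ' '], ['a', 'b', ' '], ['a', 'b', 'c']]
--     """
--     max_num = max([len(i) for i in labels])
--     for label in labels:
--         for num in range(1, max_num):
--             if len(label) == num:
--                 label.extend([" " for i in range(max_num - num)])
--     return labels
--
-- def undo_uniform_list_length(labels):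
--     """
--     Remove empty string after the operation done by uniform_list_length.
--
--     Examples:
--
--     >>> undo_uniform_list_length(uniform_list_length([['a'], ['a', 'b'], ['a', 'b', 'c']]))
--     [['a'], ['a', 'b'], ['a', 'b', 'c']]
--     """
--     for label in labels:
--         while " " in label:
--             label.remove(" ")
--     return labels
--
-- def sort_multi_lists(labels):
--     """
--     Sort a list by the order of column 0, 1 and 2.
--     Works for a list having different length of elements.
--     Now only work for a list with two or three elements.
--
--     Examples:
--     >>> sort_multi_lists([['a', 'c'], ['a', 'b'], ['a', 'b', 'c']])
--     ([['a', 'b'], ['a', 'b', 'c'], ['a', 'c']], [1, 2, 0])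
--     """
--     unilabels = uniform_list_length(labels)
--     intlist = [[i] * 3 for i in range(len(unilabels))]
--     # sort_func = itemgetter(*range(len(unilabels[0])))
--     try:
--         sort_func = lambda item: (item[0][0], item[0][1], item[0][2])
--         sort_idx = [ii[0] for (i, ii) in sorted(zip(unilabels, intlist), key=sort_func)]
--     except:
--         sort_func = lambda item: (item[0][0], item[0][1])
--         sort_idx = [ii[0] for (i, ii) in sorted(zip(unilabels, intlist), key=sort_func)]
--     sort_labels = [unilabels[i] for i in sort_idx]
--     return undo_uniform_list_length(sort_labels), sort_idx
-- ===== SOURCE B (Python) =====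
-- def sort_multi_lists(labels):
--     # Return-value equivalent to A (A also mutates `labels` in place; B does not).
--     m = max(len(l) for l in labels)
--     k = 3 if m >= 3 else 2
--     keys = [tuple(l[j] if j < len(l) else " " for j in range(k)) for l in labels]
--     idx = sorted(range(len(labels)), key=keys.__getitem__)
--     return [[x for x in labels[i] if x != " "] for i in idx], idx
-- ===== Notes on version B (the rewrite author's own statement) =====
-- stated objective: simpler
-- what changed: B replaces A's pad-all-rows/zip-with-index-triples/try-except sort and while-remove un-padding by directly sorting the index list with width-padded key tuples computed once (column count decided arithmetically from the max row length) and stripping ' ' entries in a single filter pass.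
import Mathlib
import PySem

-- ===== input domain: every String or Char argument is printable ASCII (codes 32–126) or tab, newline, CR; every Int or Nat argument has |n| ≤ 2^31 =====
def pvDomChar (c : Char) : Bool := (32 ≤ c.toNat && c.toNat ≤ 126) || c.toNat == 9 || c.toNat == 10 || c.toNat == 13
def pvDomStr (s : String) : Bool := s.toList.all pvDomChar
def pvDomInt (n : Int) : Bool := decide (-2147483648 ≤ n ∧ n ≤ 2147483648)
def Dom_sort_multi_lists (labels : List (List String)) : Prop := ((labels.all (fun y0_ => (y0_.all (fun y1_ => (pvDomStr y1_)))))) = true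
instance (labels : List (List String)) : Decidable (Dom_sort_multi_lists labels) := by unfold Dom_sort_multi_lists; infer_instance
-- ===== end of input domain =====

-- B sorts an index list by width-padded key tuples built once (no data padding/unpadding,
-- no try/except) and filters the " " entries in one pass; RETURN-VALUE equivalence only:
-- Python A also mutates `labels` in place (pads, then strips all " " entries), B does not.

-- ===== PORT A =====
-- while " " in label: label.remove(" ")   (list.remove = erase first occurrence)
def pyRemoveLoop (l : List String) : List String :=
  if h : " " ∈ l then pyRemoveLoop (l.erase " ")
  else l
termination_by l.length
decreasing_by
  have h1 := List.length_erase_of_mem h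
  have h2 := List.length_pos_of_mem h
  omega

def uniform_list_length (labels : List (List String)) : List (List String) :=
  -- max_num = max([len(i) for i in labels]); Python raises ValueError on [] (outside Pre_)
  let maxNum : Int := (PySem.List.max? (labels.map (fun i => PySem.List.len i)) (fun x => x)).getD 0
  labels.map (fun label =>
    (PySem.List.pyRange 1 maxNum).foldl
      (fun lab num =>
        if PySem.List.len lab = num
        then lab ++ (PySem.List.pyRange 0 (maxNum - num)).map (fun _ => " ")
        else lab)
      label)

def undo_uniform_list_length (labels : List (List String)) : List (List String) :=
  labels.map pyRemoveLoop

-- Python string comparison = Lean '<' on .toList (code points); tuple key ported as the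
-- corresponding List (List Char) (same lexicographic order as Python's tuple of str).
-- The try/except: the 3-column key raises IndexError exactly when some row of unilabels has
-- length < 3, so the branch test is `unilabels.all (3 ≤ ·.length)`; index accesses on which
-- Python raises (only outside Pre_) are ported with a " "/0/[] default via pyGetD.
def sort_multi_lists (labels : List (List String)) : List (List String) × List Int :=
  let unilabels := uniform_list_length labels
  let intlist := (PySem.List.pyRange 0 (PySem.List.len unilabels)).map (fun i => PySem.List.pyRepeat [i] 3)
  let sortIdx :=
    if unilabels.all (fun l => 3 ≤ l.length) then
      (PySem.List.sorted (unilabels.zip intlist)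
        (fun item => [(PySem.List.pyGetD item.1 0 " ").toList,
                      (PySem.List.pyGetD item.1 1 " ").toList,
                      (PySem.List.pyGetD item.1 2 " ").toList]) false).map
        (fun p => PySem.List.pyGetD p.2 0 0)
    else
      (PySem.List.sorted (unilabels.zip intlist)
        (fun item => [(PySem.List.pyGetD item.1 0 " ").toList,
                      (PySem.List.pyGetD item.1 1 " ").toList]) false).map
        (fun p => PySem.List.pyGetD p.2 0 0)
  let sortLabels := sortIdx.map (fun i => PySem.List.pyGetD unilabels i [])
  (undo_uniform_list_length sortLabels, sortIdx)

-- ===== PORT B =====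
def sort_multi_lists_alt (labels : List (List String)) : List (List String) × List Int :=
  let m : Int := (PySem.List.max? (labels.map (fun l => PySem.List.len l)) (fun x => x)).getD 0
  let k : Int := if 3 ≤ m then 3 else 2
  let keys := labels.map (fun l =>
    (PySem.List.pyRange 0 k).map (fun j =>
      (if j < PySem.List.len l then PySem.List.pyGetD l j " " else " ").toList))
  let idx := PySem.List.sorted (PySem.List.pyRange 0 (PySem.List.len labels))
      (fun i => PySem.List.pyGetD keys i []) false
  (idx.map (fun i => (PySem.List.pyGetD labels i []).filter (fun x => x != " ")), idx)

-- ===== PRECONDITION & SPEC =====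
-- Pre_ = exactly the inputs where Python A returns: max() raises ValueError on an empty list,
-- and the sort key raises IndexError (in both try and except branch) when some row is empty
-- or when every row is shorter than 2.
def Pre_sort_multi_lists (labels : List (List String)) : Prop :=
  labels ≠ [] ∧ (∀ l ∈ labels, l ≠ []) ∧ (∃ l ∈ labels, 2 ≤ l.length)
instance (labels : List (List String)) : Decidable (Pre_sort_multi_lists labels) := by
  unfold Pre_sort_multi_lists; infer_instance

def pvWitness_sort_multi_lists : List (List String) := [["a", "c"], ["a", "b"], ["a", "b", "c"]]

def Spec_sort_multi_lists (labels : List (List String)) (out : List (List String) × List Int) : Prop := out = sort_multi_lists_alt labels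
instance (labels : List (List String)) (out : List (List String) × List Int) : Decidable (Spec_sort_multi_lists labels out) := by unfold Spec_sort_multi_lists; infer_instance

-- ===== CLAIM (what is proved, stated in full; the proofs are below) =====
def Claim_equal_sort_multi_lists : Prop := ∀ (labels : List (List String)), Dom_sort_multi_lists labels → Pre_sort_multi_lists labels → Spec_sort_multi_lists labels (sort_multi_lists labels)


-- ===== LEMMAS AND PROOFS =====

-- the padded row: what uniform_list_length makes of a nonempty row
def pvPad (m : Int) (l : List String) : List String :=
  l ++ List.replicate (m - l.length).toNat " "

-- the max_num both programs compute
def pvM (labels : List (List String)) : Int :=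
  (PySem.List.max? (labels.map (fun i => PySem.List.len i)) (fun x => x)).getD 0

lemma pvM_spec (labels : List (List String)) (h : labels ≠ []) :
    (∀ l ∈ labels, (l.length : Int) ≤ pvM labels) ∧
      (∃ l ∈ labels, (l.length : Int) = pvM labels) := by
  unfold pvM
  cases hm : PySem.List.max? (labels.map (fun i => PySem.List.len i)) (fun x => x) with
  | none =>
    rw [PySem.List.max?_eq_none_iff] at hm
    exact absurd (List.map_eq_nil_iff.1 hm) h
  | some m' =>
    have hmax := PySem.List.max?_isMax hm
    have hmem := PySem.List.max?_mem hm
    simp only [Option.getD_some]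
    constructor
    · intro l hl
      have := hmax (PySem.List.len l) (List.mem_map_of_mem hl)
      simpa [PySem.List.len] using this
    · obtain ⟨l, hl, he⟩ := List.mem_map.1 hmem
      exact ⟨l, hl, by simpa [PySem.List.len] using he⟩

lemma pyRange_zero_map_const {α : Type} (c : Int) (x : α) :
    (PySem.List.pyRange 0 c).map (fun _ => x) = List.replicate c.toNat x := by
  rcases (by omega : 0 ≤ c ∨ c < 0) with h | h
  · lift c to Nat using h
    rw [PySem.List.pyRange_zero_natCast, List.map_map]
    rw [show ((fun (_ : Int) => x) ∘ fun (k : Nat) => (k : Int)) = (fun (_ : Nat) => x) from rfl]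
    simp [List.map_const']
  · have hnil : PySem.List.pyRange 0 c = [] := by
      apply List.eq_nil_iff_forall_not_mem.2
      intro y hy
      have := PySem.List.mem_pyRange_one.1 hy
      omega
    rw [hnil]
    have : c.toNat = 0 := Int.toNat_of_nonpos h.le
    simp [this]

lemma pad_noop (m : Int) (nums : List Int) (l : List String)
    (h : (l.length : Int) ∉ nums) :
    nums.foldl
      (fun lab num =>
        if PySem.List.len lab = num
        then lab ++ (PySem.List.pyRange 0 (m - num)).map (fun _ => " ")
        else lab) l = l := by
  induction nums with
  | nil => rfl
  | cons x xs ih =>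
    simp only [List.foldl_cons]
    rw [if_neg, ih (fun hx => h (List.mem_cons_of_mem _ hx))]
    simp only [PySem.List.len]
    intro he
    exact h (he ▸ List.mem_cons_self)

lemma pad_eq (m : Int) (l : List String) (h1 : l ≠ []) (h2 : (l.length : Int) ≤ m) :
    (PySem.List.pyRange 1 m).foldl
      (fun lab num =>
        if PySem.List.len lab = num
        then lab ++ (PySem.List.pyRange 0 (m - num)).map (fun _ => " ")
        else lab) l = pvPad m l := by
  have hl1 : 1 ≤ l.length := List.length_pos_of_ne_nil h1
  rcases (by omega : (l.length : Int) < m ∨ (l.length : Int) = m) with hlt | heq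
  · rw [PySem.List.pyRange_one_append 1 (l.length : Int) m (by omega) (by omega),
      List.foldl_append]
    rw [pad_noop m _ l (by intro hx; have := PySem.List.mem_pyRange_one.1 hx; omega)]
    rw [PySem.List.pyRange_one_cons hlt]
    simp only [List.foldl_cons]
    rw [if_pos (by simp [PySem.List.len])]
    rw [pyRange_zero_map_const]
    have hlen2 : ((l ++ List.replicate (m - (l.length : Int)).toNat " ").length : Int) = m := by
      have := Int.toNat_of_nonneg (a := m - (l.length : Int)) (by omega)
      simp [List.length_append, List.length_replicate]
      omega
    rw [pad_noop m _ _ (by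
      intro hx
      have := PySem.List.mem_pyRange_one.1 hx
      omega)]
    rfl
  · rw [pad_noop m _ l (by
      intro hx
      have := PySem.List.mem_pyRange_one.1 hx
      omega)]
    unfold pvPad
    have : (m - (l.length : Int)).toNat = 0 := by omega
    simp [this]

lemma pad_len (m : Int) (l : List String) (h2 : (l.length : Int) ≤ m) :
    ((pvPad m l).length : Int) = m := by
  unfold pvPad
  have := Int.toNat_of_nonneg (a := m - (l.length : Int)) (by omega)
  simp [List.length_append, List.length_replicate]
  omega

lemma uniform_eq (labels : List (List String)) (h1 : labels ≠ [])
    (h2 : ∀ l ∈ labels, l ≠ []) :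
    uniform_list_length labels = labels.map (pvPad (pvM labels)) := by
  simp only [uniform_list_length]
  rw [show ((PySem.List.max? (labels.map fun i => PySem.List.len i) fun x => x).getD 0) = pvM labels from rfl]
  apply List.map_congr_left
  intro l hl
  exact pad_eq (pvM labels) l (h2 l hl) ((pvM_spec labels h1).1 l hl)

lemma getD_pad (m : Int) (l : List String) (j : Int) (h2 : (l.length : Int) ≤ m)
    (h0 : 0 ≤ j) (hj : j < m) :
    PySem.List.pyGetD (pvPad m l) j " " =
      if j < PySem.List.len l then PySem.List.pyGetD l j " " else " " := by
  have hlen := pad_len m l h2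
  rw [PySem.List.pyGetD_eq_getElem _ _ h0 (by omega)]
  unfold pvPad
  rw [List.getElem_append]
  simp only [PySem.List.len]
  split
  · rename_i hin
    rw [if_pos (by omega), PySem.List.pyGetD_eq_getElem _ _ h0 (by omega)]
  · rename_i hout
    rw [if_neg (by omega), List.getElem_replicate]

lemma insertBy_map {α β : Type} (bf : β → β → Bool) (f : α → β) (x : α) (l : List α) :
    PySem.List.insertBy bf (f x) (l.map f) =
      (PySem.List.insertBy (fun a b => bf (f a) (f b)) x l).map f := by
  induction l with
  | nil => simp [PySem.List.insertBy]
  | cons y ys ih =>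
    simp only [List.map_cons, PySem.List.insertBy]
    by_cases h : bf (f x) (f y) = true <;> simp [h, ih]

lemma sorted_map {α β κ : Type} [LT κ] [DecidableLT κ] (f : α → β) (key : β → κ) (l : List α) :
    PySem.List.sorted (l.map f) key false =
      (PySem.List.sorted l (fun x => key (f x)) false).map f := by
  rw [PySem.List.sorted_eq_foldl_insertBy, PySem.List.sorted_eq_foldl_insertBy]
  have aux : ∀ (l : List α) (acc : List α),
      (l.map f).foldl (fun acc x => PySem.List.insertBy (fun a b => decide (key a < key b)) x acc) (acc.map f) =
        (l.foldl (fun acc x => PySem.List.insertBy (fun a b => decide (key (f a) < key (f b))) x acc) acc).map f := by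
    intro l
    induction l with
    | nil => intro acc; rfl
    | cons x xs ih =>
      intro acc
      simp only [List.map_cons, List.foldl_cons]
      rw [insertBy_map (fun a b => decide (key a < key b)) f x acc]
      exact ih _
  simpa using aux l []

lemma insertBy_congr {α : Type} (b1 b2 : α → α → Bool) (x : α) (acc : List α)
    (h : ∀ y ∈ acc, b1 x y = b2 x y) :
    PySem.List.insertBy b1 x acc = PySem.List.insertBy b2 x acc := by
  induction acc with
  | nil => rfl
  | cons y ys ih =>
    simp only [PySem.List.insertBy]
    rw [h y List.mem_cons_self]
    by_cases hb : b2 x y = true <;>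
      simp [hb, ih (fun z hz => h z (List.mem_cons_of_mem _ hz))]

lemma sorted_congr {α κ : Type} [LT κ] [DecidableLT κ] (l : List α) (k1 k2 : α → κ)
    (h : ∀ x ∈ l, k1 x = k2 x) :
    PySem.List.sorted l k1 false = PySem.List.sorted l k2 false := by
  rw [PySem.List.sorted_eq_foldl_insertBy, PySem.List.sorted_eq_foldl_insertBy]
  have aux : ∀ (l' : List α) (acc : List α), (∀ x ∈ l', k1 x = k2 x) → (∀ x ∈ acc, k1 x = k2 x) →
      l'.foldl (fun acc x => PySem.List.insertBy (fun a b => decide (k1 a < k1 b)) x acc) acc =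
        l'.foldl (fun acc x => PySem.List.insertBy (fun a b => decide (k2 a < k2 b)) x acc) acc := by
    intro l'
    induction l' with
    | nil => intro acc _ _; rfl
    | cons x xs ih =>
      intro acc hl hacc
      simp only [List.foldl_cons]
      have hstep : PySem.List.insertBy (fun a b => decide (k1 a < k1 b)) x acc =
          PySem.List.insertBy (fun a b => decide (k2 a < k2 b)) x acc := by
        apply insertBy_congr
        intro y hy
        rw [hl x List.mem_cons_self, hacc y hy]
      rw [hstep]
      apply ih _ (fun z hz => hl z (List.mem_cons_of_mem _ hz))
      intro z hz
      rcases (PySem.List.mem_insertBy _ _ _ _).1 hz with rfl | hz'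
      · exact hl z List.mem_cons_self
      · exact hacc z hz'
  exact aux l [] h (by simp)

lemma removeLoop_eq_filter (l : List String) :
    pyRemoveLoop l = l.filter (fun x => x != " ") := by
  have herase : ∀ (l : List String),
      (l.erase " ").filter (fun x => x != " ") = l.filter (fun x => x != " ") := by
    intro l
    induction l with
    | nil => rfl
    | cons x xs ih =>
      by_cases hx : x = " "
      · subst hx
        simp
      · simp [hx, ih]
  induction l using pyRemoveLoop.induct with
  | case1 l h ih =>
    rw [pyRemoveLoop, dif_pos h, ih, herase]
  | case2 l h =>
    rw [pyRemoveLoop, dif_neg h]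
    symm
    rw [List.filter_eq_self]
    intro a ha
    simp only [bne_iff_ne, ne_eq]
    rintro rfl
    exact h ha


lemma filter_pad (m : Int) (l : List String) :
    (pvPad m l).filter (fun x => x != " ") = l.filter (fun x => x != " ") := by
  unfold pvPad
  rw [List.filter_append]
  simp

lemma zip_intlist (labels : List (List String)) (m : Int) :
    (labels.map (pvPad m)).zip
        ((PySem.List.pyRange 0 (labels.length : Int)).map (fun i => PySem.List.pyRepeat [i] 3)) =
      (PySem.List.pyRange 0 (labels.length : Int)).map
        (fun i => (pvPad m (PySem.List.pyGetD labels i []), PySem.List.pyRepeat [i] 3)) := by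
  have hlab : (PySem.List.pyRange 0 (labels.length : Int)).map
      (fun j => PySem.List.pyGetD labels j []) = labels := by
    simpa [PySem.List.len] using PySem.List.map_pyGetD_pyRange_zero labels []
  conv_lhs =>
    rw [show labels.map (pvPad m) =
      ((PySem.List.pyRange 0 (labels.length : Int)).map
        (fun j => PySem.List.pyGetD labels j [])).map (pvPad m) from by rw [hlab]]
  rw [List.map_map, List.zip_map']
  rfl

lemma sortIdx_eq (labels : List (List String)) (m : Int) (cols : List Int)
    (hmax_le : ∀ l ∈ labels, (l.length : Int) ≤ m)
    (hcols : ∀ j ∈ cols, 0 ≤ j ∧ j < m) :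
    (PySem.List.sorted
        ((PySem.List.pyRange 0 (labels.length : Int)).map
          (fun i => (pvPad m (PySem.List.pyGetD labels i []), PySem.List.pyRepeat [i] 3)))
        (fun item => cols.map (fun j => (PySem.List.pyGetD item.1 j " ").toList)) false).map
      (fun p => PySem.List.pyGetD p.2 0 0)
    = PySem.List.sorted (PySem.List.pyRange 0 (labels.length : Int))
        (fun i => PySem.List.pyGetD
          (labels.map (fun l =>
            cols.map (fun j => (if j < (l.length : Int) then PySem.List.pyGetD l j " " else " ").toList))) i [])
        false := by
  rw [sorted_map (fun i => (pvPad m (PySem.List.pyGetD labels i []), PySem.List.pyRepeat [i] 3))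
    (fun item => cols.map (fun j => (PySem.List.pyGetD item.1 j " ").toList))
    (PySem.List.pyRange 0 (labels.length : Int))]
  rw [List.map_map]
  have hex : ∀ (x : Int), PySem.List.pyGetD (PySem.List.pyRepeat [x] 3) 0 0 = x := by
    intro x
    rw [PySem.List.pyRepeat_singleton]
    rw [PySem.List.pyGetD_eq_getElem _ _ (by omega) (by simp)]
    simp
  simp only [Function.comp_def, hex, List.map_id']
  apply sorted_congr
  intro i hi
  obtain ⟨h0i, hin⟩ := PySem.List.mem_pyRange_one.1 hi
  have hgl : PySem.List.pyGetD labels i [] = labels[i.toNat]'(by omega) := by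
    rw [PySem.List.pyGetD_eq_getElem _ _ h0i (by omega)]
  have hgk : PySem.List.pyGetD
      (labels.map (fun l =>
        cols.map (fun j => (if j < (l.length : Int) then PySem.List.pyGetD l j " " else " ").toList))) i []
      = cols.map (fun j => (if j < ((labels[i.toNat]'(by omega)).length : Int)
          then PySem.List.pyGetD (labels[i.toNat]'(by omega)) j " " else " ").toList) := by
    rw [PySem.List.pyGetD_eq_getElem _ _ h0i (by simp; omega), List.getElem_map]
  rw [hgl, hgk]
  apply List.map_congr_left
  intro j hj
  obtain ⟨hj0, hjm⟩ := hcols j hj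
  rw [getD_pad m _ j (hmax_le _ (List.getElem_mem _)) hj0 hjm]
  simp only [PySem.List.len]
  rfl

theorem sort_multi_lists_agree (labels : List (List String))
    (hpre : Pre_sort_multi_lists labels) :
    sort_multi_lists labels = sort_multi_lists_alt labels := by
  obtain ⟨hne, hnonempty, l₂, hl₂, hlen2⟩ := hpre
  obtain ⟨hmax_le, lm, hlm, hlmM⟩ := pvM_spec labels hne
  have h2m : 2 ≤ pvM labels := by
    have := hmax_le l₂ hl₂
    omega
  set m := pvM labels with hmdef
  simp only [sort_multi_lists, sort_multi_lists_alt]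
  rw [show ((PySem.List.max? (labels.map fun l => PySem.List.len l) fun x => x).getD 0) = m from by
    rw [hmdef]; rfl]
  rw [uniform_eq labels hne hnonempty, ← hmdef]
  simp only [PySem.List.len, List.length_map]
  rw [zip_intlist labels m]
  by_cases h3 : 3 ≤ m
  · have hall : ((labels.map (pvPad m)).all fun l => decide (3 ≤ l.length)) = true := by
      rw [List.all_eq_true]
      intro x hx
      obtain ⟨l, hl, rfl⟩ := List.mem_map.1 hx
      have := pad_len m l (hmax_le l hl)
      simp only [decide_eq_true_eq]
      omega
    rw [if_pos hall, if_pos h3]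
    have hidx := sortIdx_eq labels m [0, 1, 2] hmax_le
      (by intro j hj; fin_cases hj <;> constructor <;> omega)
    refine Prod.ext ?_ hidx
    show undo_uniform_list_length
        (((PySem.List.sorted
            ((PySem.List.pyRange 0 (labels.length : Int)).map
              (fun i => (pvPad m (PySem.List.pyGetD labels i []), PySem.List.pyRepeat [i] 3)))
            (fun item => ([0, 1, 2] : List Int).map
              (fun j => (PySem.List.pyGetD item.1 j " ").toList)) false).map
          (fun p => PySem.List.pyGetD p.2 0 0)).map
          (fun i => PySem.List.pyGetD (labels.map (pvPad m)) i []))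
      = (PySem.List.sorted (PySem.List.pyRange 0 (labels.length : Int))
          (fun i => PySem.List.pyGetD
            (labels.map (fun l => ([0, 1, 2] : List Int).map
              (fun j => (if j < (l.length : Int) then PySem.List.pyGetD l j " " else " ").toList))) i [])
          false).map
          (fun i => (PySem.List.pyGetD labels i []).filter (fun x => x != " "))
    rw [hidx]
    simp only [undo_uniform_list_length, List.map_map]
    apply List.map_congr_left
    intro i hi
    rw [PySem.List.mem_sorted] at hi
    obtain ⟨h0i, hin⟩ := PySem.List.mem_pyRange_one.1 hi
    simp only [Function.comp_def]
    rw [PySem.List.pyGetD_eq_getElem _ _ h0i (by simp; omega), List.getElem_map,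
      PySem.List.pyGetD_eq_getElem _ _ h0i (by omega), removeLoop_eq_filter, filter_pad]
  · have hall : ¬ (((labels.map (pvPad m)).all fun l => decide (3 ≤ l.length)) = true) := by
      intro hall
      rw [List.all_eq_true] at hall
      have := hall (pvPad m lm) (List.mem_map_of_mem hlm)
      have hl := pad_len m lm (hmax_le lm hlm)
      simp only [decide_eq_true_eq] at this
      omega
    rw [if_neg hall, if_neg h3]
    have hidx := sortIdx_eq labels m [0, 1] hmax_le
      (by intro j hj; fin_cases hj <;> constructor <;> omega)
    refine Prod.ext ?_ hidx
    show undo_uniform_list_length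
        (((PySem.List.sorted
            ((PySem.List.pyRange 0 (labels.length : Int)).map
              (fun i => (pvPad m (PySem.List.pyGetD labels i []), PySem.List.pyRepeat [i] 3)))
            (fun item => ([0, 1] : List Int).map
              (fun j => (PySem.List.pyGetD item.1 j " ").toList)) false).map
          (fun p => PySem.List.pyGetD p.2 0 0)).map
          (fun i => PySem.List.pyGetD (labels.map (pvPad m)) i []))
      = (PySem.List.sorted (PySem.List.pyRange 0 (labels.length : Int))
          (fun i => PySem.List.pyGetD
            (labels.map (fun l => ([0, 1] : List Int).map
              (fun j => (if j < (l.length : Int) then PySem.List.pyGetD l j " " else " ").toList))) i [])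
          false).map
          (fun i => (PySem.List.pyGetD labels i []).filter (fun x => x != " "))
    rw [hidx]
    simp only [undo_uniform_list_length, List.map_map]
    apply List.map_congr_left
    intro i hi
    rw [PySem.List.mem_sorted] at hi
    obtain ⟨h0i, hin⟩ := PySem.List.mem_pyRange_one.1 hi
    simp only [Function.comp_def]
    rw [PySem.List.pyGetD_eq_getElem _ _ h0i (by simp; omega), List.getElem_map,
      PySem.List.pyGetD_eq_getElem _ _ h0i (by omega), removeLoop_eq_filter, filter_pad]

-- ===== VERDICT (by name: the statement is the Claim_ definition above) =====
theorem sort_multi_lists_spec : Claim_equal_sort_multi_lists := by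
  intro labels _ hpre
  exact sort_multi_lists_agree labels hpre
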